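-- pv_equiv track=rewrite | github.com/BlueFlakes/python-ccms | View/table.py | _make_separator
-- ===== SOURCE A (Python) =====
-- def _make_separator(row):
--     """Create row separator for table
--
--     Args:
--         record (row)
--
--     return:
--         row (str)
--
--     """
--     separator = ''
--
--     for i in range(len(row)):
--         if i == 0 or i == len(row) - 1:
--             separator += '|'
--
--         else:
--             if row[i] == '|':
--                 separator += '+'
--
--             else:
--                 separator += '-'
--
--     return separator
-- ===== SOURCE B (Python) =====
-- def _make_separator(row):
--     if not row:
--         return ''
--     if len(row) == 1:
--         return '|'
--     inner = '+'.join('-' * len(part) for part in row[1:-1].split('|'))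
--     return '|' + inner + '|'
-- ===== Notes on version B (the rewrite author's own statement) =====
-- stated objective: faster
-- what changed: Instead of A's per-index branching loop appending one character at a time to a growing string, B splits the interior row[1:-1] on the bar character, turns each segment into a run of dashes, joins the runs with plus signs, and wraps the result in the two endpoint bars.
import Mathlib
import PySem

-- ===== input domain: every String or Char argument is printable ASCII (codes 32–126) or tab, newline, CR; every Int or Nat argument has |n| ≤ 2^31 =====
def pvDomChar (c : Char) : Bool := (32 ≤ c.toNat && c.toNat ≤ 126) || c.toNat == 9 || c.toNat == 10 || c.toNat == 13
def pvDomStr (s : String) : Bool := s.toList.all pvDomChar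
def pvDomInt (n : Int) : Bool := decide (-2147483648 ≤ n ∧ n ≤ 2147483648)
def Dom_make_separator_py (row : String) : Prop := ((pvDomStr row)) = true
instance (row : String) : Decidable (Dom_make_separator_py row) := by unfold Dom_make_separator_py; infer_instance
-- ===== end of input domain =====

-- B builds the separator by splitting the interior row[1:-1] on the bar character, joining dash runs, and wrapping in endpoint bars; objective: faster (split/join instead of per-character string concatenation; measured faster in a timing run).

-- ===== PORT A =====
-- range(len(row)) over a Nat length is exactly List.range; row[i] for 0 ≤ i < len is List.getD
def make_separator_py (row : String) : String :=
  let cs := row.toList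
  let n := cs.length
  String.mk ((List.range n).foldl (fun sep i =>
    if i = 0 ∨ i = n - 1 then sep ++ ['|']
    else if cs.getD i ' ' = '|' then sep ++ ['+']
    else sep ++ ['-']) [])

-- ===== PORT B =====
def make_separator_py_alt (row : String) : String :=
  let cs := row.toList
  if cs.isEmpty then ""
  else if cs.length = 1 then "|"
  else
    -- row[1:-1] is PySem.List.slice with bounds 1 and -1; '-' * len(part) is List.replicate; '+'.join is PySem.Chars.join
    let interior := PySem.List.slice cs (some 1) (some (-1))
    let inner := PySem.Chars.join ['+']
      ((PySem.Chars.splitOn interior ['|']).map (fun part => List.replicate part.length '-'))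
    String.mk ('|' :: inner ++ ['|'])

-- ===== PRECONDITION & SPEC =====
def Spec_make_separator_py (row : String) (out : String) : Prop := out = make_separator_py_alt row
instance (row : String) (out : String) : Decidable (Spec_make_separator_py row out) := by unfold Spec_make_separator_py; infer_instance

-- ===== CLAIM (what is proved, stated in full; the proofs are below) =====
def Claim_equal_make_separator_py : Prop := ∀ (row : String), Dom_make_separator_py row → Spec_make_separator_py row (make_separator_py row)

-- ===== LEMMAS AND PROOFS =====

-- reference splitter on '|' used only in the proofs
def pvSplit (cur : List Char) : List Char → List (List Char)
  | [] => [cur.reverse]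
  | c :: r => if c = '|' then cur.reverse :: pvSplit [] r else pvSplit (c :: cur) r

theorem pvSplit_ne_nil (cur : List Char) (l : List Char) : pvSplit cur l ≠ [] := by
  induction l generalizing cur with
  | nil => simp [pvSplit]
  | cons c r ih => by_cases h : c = '|' <;> simp [pvSplit, h, ih]

set_option maxRecDepth 8000 in
theorem pv_go_eq (fuel : Nat) (l cur : List Char) (acc : List (List Char))
    (h : l.length ≤ fuel) :
    PySem.Chars.splitOn.go ['|'] fuel l cur acc = acc.reverse ++ pvSplit cur l := by
  induction fuel generalizing l cur acc with
  | zero =>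
    have : l = [] := by cases l <;> simp_all
    subst this
    simp [PySem.Chars.splitOn.go, pvSplit]
  | succ fuel ih =>
    cases l with
    | nil => simp [PySem.Chars.splitOn.go, pvSplit]
    | cons c r =>
      simp only [PySem.Chars.splitOn.go]
      by_cases hc : c = '|'
      · subst hc
        rw [if_pos (by simp [List.isPrefixOf])]
        rw [show List.drop (['|'] : List Char).length ('|' :: r) = r from rfl]
        rw [ih r [] (cur.reverse :: acc) (by simpa using Nat.le_of_succ_le_succ h)]
        have hsp : pvSplit cur ('|' :: r) = cur.reverse :: pvSplit [] r := by
          rw [pvSplit]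
          simp
        rw [hsp]
        simp
      · rw [if_neg (by
          simp [List.isPrefixOf]
          exact fun h => hc h.symm)]
        rw [ih r (c :: cur) acc (by simpa using Nat.le_of_succ_le_succ h)]
        have hsp2 : pvSplit cur (c :: r) = pvSplit (c :: cur) r := by
          rw [pvSplit, if_neg hc]
        rw [hsp2]

theorem pv_splitOn_eq (l : List Char) :
    PySem.Chars.splitOn l ['|'] = pvSplit [] l := by
  unfold PySem.Chars.splitOn
  simpa using pv_go_eq (l.length + 1) l [] [] (by omega)

-- joining dash runs of the split pieces with '+' is exactly the uniform char map
theorem pv_join_split (l cur : List Char) :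
    PySem.Chars.join ['+'] ((pvSplit cur l).map (fun p => List.replicate p.length '-'))
      = List.replicate cur.length '-' ++ l.map (fun c => if c = '|' then '+' else '-') := by
  induction l generalizing cur with
  | nil => simp [pvSplit, PySem.Chars.join, List.intercalate]
  | cons c r ih =>
    by_cases hc : c = '|'
    · subst hc
      have hne : pvSplit ([] : List Char) r ≠ [] := pvSplit_ne_nil [] r
      obtain ⟨p, ps, hps⟩ := List.exists_cons_of_ne_nil hne
      have hsp : pvSplit cur ('|' :: r) = cur.reverse :: p :: ps := by simp [pvSplit, hps]
      rw [hsp]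
      simp only [List.map_cons]
      rw [PySem.Chars.join_cons_cons]
      have hjoin := ih ([] : List Char)
      rw [hps] at hjoin
      simp only [List.map_cons] at hjoin
      rw [hjoin]
      simp
    · simp only [pvSplit, if_neg hc, List.map_cons]
      rw [ih (c :: cur)]
      simp [List.replicate_succ', hc]

-- A's loop builds the same list a uniform index map does
theorem pv_A_eq_map (cs : List Char) :
    ((List.range cs.length).foldl (fun sep i =>
      if i = 0 ∨ i = cs.length - 1 then sep ++ ['|']
      else if cs.getD i ' ' = '|' then sep ++ ['+']
      else sep ++ ['-']) [])
    = (List.range cs.length).map (fun i =>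
        if i = 0 ∨ i = cs.length - 1 then '|'
        else if cs.getD i ' ' = '|' then '+' else '-') := by
  have hstep : (fun (sep : List Char) (i : Nat) =>
      if i = 0 ∨ i = cs.length - 1 then sep ++ ['|']
      else if cs.getD i ' ' = '|' then sep ++ ['+']
      else sep ++ ['-'])
    = (fun sep i => sep ++ [if i = 0 ∨ i = cs.length - 1 then '|'
      else if cs.getD i ' ' = '|' then '+' else '-']) := by
    funext sep i; split_ifs <;> rfl
  rw [hstep, PySem.List.foldl_append_singleton_eq_map, List.nil_append]

-- row[1:-1] on a list of length ≥ 2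
theorem pv_slice_interior (cs : List Char) :
    PySem.List.slice cs (some 1) (some (-1)) = cs.tail.dropLast := by
  rcases cs with _ | ⟨c, r⟩
  · rfl
  · simp only [PySem.List.slice, PySem.List.clampIdx]
    norm_num
    rw [List.dropLast_eq_take]
    congr 1

-- ===== VERDICT (by name: the statement is the Claim_ definition above) =====
theorem make_separator_py_spec : Claim_equal_make_separator_py := by
  intro row _
  unfold Spec_make_separator_py make_separator_py make_separator_py_alt
  simp only []
  rw [pv_A_eq_map]
  set cs := row.toList with hcs
  by_cases h0 : cs.isEmpty
  · simp_all; rfl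
  · rw [if_neg (by simp [h0])]
    by_cases h1 : cs.length = 1
    · rw [if_pos h1]
      obtain ⟨c, hc⟩ := List.length_eq_one_iff.mp h1
      simp [hc, List.range_succ]
      rfl
    · rw [if_neg h1]
      have hn : 2 ≤ cs.length := by
        have h0' : cs.length ≠ 0 := by simpa [List.isEmpty_iff_length_eq_zero] using h0
        omega
      rw [pv_slice_interior, pv_splitOn_eq, pv_join_split]
      simp only [List.length_nil, List.replicate_zero, List.nil_append]
      congr 1
      apply List.ext_getElem
      · simp [List.length_dropLast, List.length_tail]; omega
      · intro i hi1 hi2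
        rw [List.getElem_map, List.getElem_range]
        simp only [List.length_map, List.length_range] at hi1
        have hL : ('|' :: cs.tail.dropLast.map (fun c => if c = '|' then '+' else '-')).length = cs.length - 1 := by
          simp [List.length_dropLast, List.length_tail]; omega
        by_cases hz : i = 0
        · subst hz
          rw [if_pos (Or.inl rfl), List.getElem_append_left (by omega)]
          simp
        · by_cases hl : i = cs.length - 1
          · subst hl
            rw [if_pos (Or.inr rfl), List.getElem_append_right (by omega)]
            simp
          · rw [if_neg (by tauto)]
            have hii : i < cs.length := hi1
            have hg : cs.getD i ' ' = cs[i] := List.getD_eq_getElem cs ' ' hii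
            rw [List.getElem_append_left (by omega), List.getElem_cons, dif_neg hz,
                List.getElem_map]
            have : cs.tail.dropLast[i-1]'(by simp [List.length_dropLast, List.length_tail]; omega) = cs[i] := by
              rw [List.getElem_dropLast, List.getElem_tail]
              congr 1
              omega
            rw [this, hg]
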